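-- pv_equiv track=rewrite | github.com/posl/comment_recommendation | script/mod_gen/5_time/ja/216_C/0.py | solve
-- ===== SOURCE A (Python) =====
-- def solve(n):
--     result = ""
--     while n > 0:
--         if n % 2 == 0:
--             n = n // 2
--             result = "B" + result
--         else:
--             n = n - 1
--             result = "A" + result
--     return result
-- ===== SOURCE B (Python) =====
-- def _bits(n):
--     # MSB-first binary digits of n (empty for n <= 0)
--     if n <= 0:
--         return []
--     return _bits(n // 2) + ['1' if n % 2 == 1 else '0']
--
-- def solve(n):
--     if n <= 0:
--         return ""
--     bits = _bits(n)
--     parts = ["A"]  # the leading binary 1 always maps to "A"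
--     for b in bits[1:]:
--         parts.append("BA" if b == '1' else "B")
--     return "".join(parts)
-- ===== Notes on version B (the rewrite author's own statement) =====
-- stated objective: alternative
-- what changed: B first computes the MSB-first binary digits of n, then one forward pass maps the leading bit to "A" and each later bit to "BA"/"B" and joins, instead of A's halving/decrement while-loop that prepends single characters.
import Mathlib
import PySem

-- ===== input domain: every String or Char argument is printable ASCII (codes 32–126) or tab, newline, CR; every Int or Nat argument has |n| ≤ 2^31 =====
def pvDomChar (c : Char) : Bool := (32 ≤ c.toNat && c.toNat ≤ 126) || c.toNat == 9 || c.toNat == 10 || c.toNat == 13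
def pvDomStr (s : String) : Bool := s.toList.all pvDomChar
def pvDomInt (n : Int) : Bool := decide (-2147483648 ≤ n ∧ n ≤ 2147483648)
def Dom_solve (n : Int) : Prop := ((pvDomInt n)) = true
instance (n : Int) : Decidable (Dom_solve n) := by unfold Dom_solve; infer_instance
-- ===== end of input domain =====

-- B builds the MSB-first binary digits of n and then maps them to "A"/"BA"/"B" in one
-- forward pass, instead of A's halving/decrement loop that prepends single characters.

-- ===== PORT A =====
def solveGo (n : Int) (result : String) : String :=
  if _h : n > 0 then
    if PySem.Int.mod n 2 == 0 then
      solveGo (PySem.Int.floordiv n 2) ("B" ++ result)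
    else
      solveGo (n - 1) ("A" ++ result)
  else result
termination_by n.toNat
decreasing_by
  · rw [PySem.Int.floordiv_eq_ediv_of_pos (by omega)]; omega
  · omega

def solve (n : Int) : String := solveGo n ""

-- ===== PORT B =====
def pvBits (n : Int) : List Char :=
  if _h : n ≤ 0 then []
  else pvBits (PySem.Int.floordiv n 2) ++ [if PySem.Int.mod n 2 == 1 then '1' else '0']
termination_by n.toNat
decreasing_by
  rw [PySem.Int.floordiv_eq_ediv_of_pos (by omega)]; omega

def solve_alt (n : Int) : String :=
  if n ≤ 0 then ""
  else
    let bits := pvBits n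
    let parts := (bits.drop 1).foldl
      (fun acc b => acc ++ [if b == '1' then "BA" else "B"]) ["A"]
    String.join parts

-- ===== PRECONDITION & SPEC =====
def Spec_solve (n : Int) (out : String) : Prop := out = solve_alt n
instance (n : Int) (out : String) : Decidable (Spec_solve n out) := by unfold Spec_solve; infer_instance

-- ===== CLAIM (what is proved, stated in full; the proofs are below) =====
def Claim_equal_solve : Prop := ∀ (n : Int), Dom_solve n → Spec_solve n (solve n)

-- ===== LEMMAS AND PROOFS =====

lemma foldl_snoc_eq_map (enc : Char → String) (bs : List Char) (init : List String) :
    bs.foldl (fun acc b => acc ++ [enc b]) init = init ++ bs.map enc := by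
  induction bs generalizing init with
  | nil => simp
  | cons b bs ih => simp [List.foldl, ih]

lemma foldl_str_append (l : List String) (init : String) :
    l.foldl (fun r s => r ++ s) init = init ++ l.foldl (fun r s => r ++ s) "" := by
  induction l generalizing init with
  | nil => simp
  | cons x xs ih =>
    simp only [List.foldl]
    rw [ih (init ++ x), ih ("" ++ x)]
    simp [String.append_assoc]

lemma alt_pos (n : Int) (hn : 0 < n) :
    solve_alt n =
      "A" ++ String.join (((pvBits n).drop 1).map (fun b => if b == '1' then "BA" else "B")) := by
  rw [solve_alt]
  rw [if_neg (by omega)]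
  simp only [foldl_snoc_eq_map]
  simp only [String.join]
  rw [show (["A"] : List String) ++ ((pvBits n).drop 1).map (fun b => if b == '1' then "BA" else "B") = "A" :: ((pvBits n).drop 1).map (fun b => if b == '1' then "BA" else "B") from rfl]
  simp only [List.foldl]
  rw [foldl_str_append]
  simp

lemma pvBits_pos (n : Int) (hn : 0 < n) :
    pvBits n = pvBits (n / 2) ++ [if n % 2 == 1 then '1' else '0'] := by
  rw [pvBits]
  rw [PySem.Int.floordiv_eq_ediv_of_pos (by omega), PySem.Int.mod_eq_emod_of_pos (by omega)]
  rw [dif_neg (by omega)]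

lemma pvBits_ne_nil (n : Int) (hn : 0 < n) : pvBits n ≠ [] := by
  rw [pvBits_pos n hn]; simp

lemma pvBits_zero : pvBits 0 = [] := by rw [pvBits]; simp

lemma drop_one_append_singleton (bs : List Char) (c : Char) (h : bs ≠ []) :
    (bs ++ [c]).drop 1 = bs.drop 1 ++ [c] := by
  cases bs with
  | nil => exact absurd rfl h
  | cons x xs => simp

lemma join_map_snoc (enc : Char → String) (l : List Char) (c : Char) :
    String.join ((l ++ [c]).map enc) = String.join (l.map enc) ++ enc c := by
  simp [String.join, List.map_append, List.foldl_append]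

lemma alt_one : solve_alt 1 = "A" := by
  rw [alt_pos 1 (by omega), pvBits_pos 1 (by omega)]
  norm_num [pvBits_zero, String.join]

lemma alt_even (n : Int) (hn : 0 < n) (he : n % 2 = 0) :
    solve_alt n = solve_alt (n / 2) ++ "B" := by
  have h2 : 0 < n / 2 := by omega
  rw [alt_pos n hn, alt_pos (n / 2) h2, pvBits_pos n hn,
    drop_one_append_singleton _ _ (pvBits_ne_nil (n / 2) h2), join_map_snoc]
  simp [he, String.append_assoc]

lemma alt_odd (n : Int) (hn : 1 < n) (ho : n % 2 = 1) :
    solve_alt n = solve_alt (n - 1) ++ "A" := by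
  have h2 : 0 < n / 2 := by omega
  have he : (n - 1) % 2 = 0 := by omega
  have hd : (n - 1) / 2 = n / 2 := by omega
  rw [alt_pos n (by omega), alt_pos (n - 1) (by omega), pvBits_pos n (by omega),
    pvBits_pos (n - 1) (by omega), hd,
    drop_one_append_singleton _ _ (pvBits_ne_nil (n / 2) h2),
    drop_one_append_singleton _ _ (pvBits_ne_nil (n / 2) h2),
    join_map_snoc, join_map_snoc]
  simp [ho, he, String.append_assoc]

lemma solveGo_nonpos (n : Int) (r : String) (hn : ¬ n > 0) : solveGo n r = r := by
  rw [solveGo]; simp [hn]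

lemma solveGo_eq (k : Nat) : ∀ n r, n.toNat ≤ k → 0 < n → solveGo n r = solve_alt n ++ r := by
  induction k with
  | zero => intro n r hk hn; omega
  | succ k ih =>
    intro n r hk hn
    rw [solveGo, dif_pos hn, PySem.Int.mod_eq_emod_of_pos (by omega),
      PySem.Int.floordiv_eq_ediv_of_pos (by omega)]
    by_cases he : n % 2 = 0
    · have h2 : 0 < n / 2 := by omega
      rw [if_pos (by simp [he]), ih (n / 2) _ (by omega) h2, alt_even n hn he,
        String.append_assoc]
    · have ho : n % 2 = 1 := by omega
      rw [if_neg (by simp [ho])]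
      by_cases h1 : n = 1
      · subst h1
        rw [solveGo_nonpos _ _ (by omega), alt_one]
      · rw [ih (n - 1) _ (by omega) (by omega), alt_odd n (by omega) ho,
          String.append_assoc]

-- ===== VERDICT (by name: the statement is the Claim_ definition above) =====
theorem solve_spec : Claim_equal_solve := by
  intro n _
  unfold Spec_solve solve
  by_cases hn : 0 < n
  · rw [solveGo_eq n.toNat n "" le_rfl hn]
    simp
  · rw [solveGo_nonpos n "" hn, solve_alt, if_pos (by omega)]
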